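-- pv_equiv track=rewrite | github.com/igrynok/learning-snippets | python/google_qa/coupons.py | min_cost_to_win
-- ===== SOURCE A (Python) =====
-- from typing import List
--
-- def min_cost_to_win(nums: List[int]) -> int:
--
--     dist = {}
--     min_cost = 10**9
--
--     for i in range(len(nums)):
--         if nums[i] in dist:
--             min_cost = min(min_cost, i - dist[nums[i]] + 1)
--         else:
--             dist[nums[i]] = i
--
--     return min_cost if min_cost != 10**9 else -1
-- ===== SOURCE B (Python) =====
-- def min_cost_to_win(nums):
--     # Two-pass: group all indices by value, then aggregate per repeated value.
--     groups = {}
--     for i, v in enumerate(nums):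
--         groups.setdefault(v, []).append(i)
--     best = 10**9
--     for idxs in groups.values():
--         if len(idxs) >= 2:
--             best = min(best, idxs[1] - idxs[0] + 1)
--     return best if best != 10**9 else -1
-- ===== Notes on version B (the rewrite author's own statement) =====
-- stated objective: alternative
-- what changed: A interleaves a first-index dict with a running min in one scan; B first groups all occurrence indices per value into an index-list dict, then a second pass takes the min of second-minus-first+1 over the repeated values.
import Mathlib
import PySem

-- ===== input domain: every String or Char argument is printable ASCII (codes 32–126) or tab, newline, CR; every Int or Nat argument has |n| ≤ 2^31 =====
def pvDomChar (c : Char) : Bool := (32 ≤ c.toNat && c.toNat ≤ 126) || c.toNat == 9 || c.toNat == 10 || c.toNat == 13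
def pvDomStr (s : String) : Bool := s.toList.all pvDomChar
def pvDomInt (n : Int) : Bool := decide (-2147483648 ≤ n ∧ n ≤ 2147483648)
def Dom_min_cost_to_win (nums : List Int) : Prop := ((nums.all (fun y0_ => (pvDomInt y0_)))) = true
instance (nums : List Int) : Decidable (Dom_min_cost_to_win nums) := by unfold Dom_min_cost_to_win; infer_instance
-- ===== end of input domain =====

-- B replaces A's single interleaved scan (first-index dict + running min) by a two-pass
-- scheme: group all occurrence indices per value, then aggregate per repeated value (alternative decomposition, same asymptotic cost).

-- ===== PORT A =====
-- loop body of A: dist lookup, then either update min_cost or record the first index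
def aStep (st : PySem.Dict Int Int × Int) (i : Int) (v : Int) : PySem.Dict Int Int × Int :=
  match st.1.get? v with
  | some d => (st.1, min st.2 (i - d + 1))
  | none => (st.1.insert v i, st.2)

def min_cost_to_win (nums : List Int) : Int :=
  let r := (PySem.List.pyRange 0 (nums.length : Int) 1).foldl
    (fun st i => aStep st i (PySem.List.pyGetD nums i 0)) (PySem.Dict.empty, 10^9)
  if r.2 ≠ 10^9 then r.2 else -1

-- ===== PORT B =====
-- first pass of B: groups.setdefault(v, []).append(i)  ==  modify v with default [] appending i
def bGroups (nums : List Int) : PySem.Dict Int (List Int) :=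
  (PySem.List.enumerate nums).foldl (fun g p => g.modify p.2 [] (fun l => l ++ [p.1])) PySem.Dict.empty

-- second pass of B: idxs[0]/idxs[1] are in range under the length guard, so getD is exact
def bStep (b : Int) (idxs : List Int) : Int :=
  if 2 ≤ idxs.length then min b (idxs.getD 1 0 - idxs.getD 0 0 + 1) else b

def min_cost_to_win_alt (nums : List Int) : Int :=
  let best := (bGroups nums).values.foldl bStep (10^9)
  if best ≠ 10^9 then best else -1

-- ===== PRECONDITION & SPEC =====
def Spec_min_cost_to_win (nums : List Int) (out : Int) : Prop := out = min_cost_to_win_alt nums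
instance (nums : List Int) (out : Int) : Decidable (Spec_min_cost_to_win nums out) := by unfold Spec_min_cost_to_win; infer_instance

-- ===== CLAIM (what is proved, stated in full; the proofs are below) =====
def Claim_equal_min_cost_to_win : Prop := ∀ (nums : List Int), Dom_min_cost_to_win nums → Spec_min_cost_to_win nums (min_cost_to_win nums)

-- ===== LEMMAS AND PROOFS =====

-- eIdx xs v = the (increasing) list of indices at which v occurs in xs
def eIdx (xs : List Int) (v : Int) : List Int :=
  ((PySem.List.enumerate xs).filter (fun p => p.2 == v)).map (fun p => p.1)

-- M L = running minimum of L started from A's sentinel 10^9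
def M (L : List Int) : Int := L.foldl min (10^9)

-- per-occurrence costs produced by A's scan (one cost for every non-first occurrence)
def costsA (xs : List Int) : List Int :=
  ((PySem.List.enumerate xs).filter (fun p => !((eIdx xs p.2).headD p.1 == p.1))).map
    (fun p => p.1 - (eIdx xs p.2).headD 0 + 1)

-- per-value costs produced by B's aggregation (one cost for every repeated value)
def costsB (xs : List Int) : List Int :=
  ((PySem.Set.ofList xs).filter (fun v => 2 ≤ (eIdx xs v).length)).map
    (fun v => (eIdx xs v).getD 1 0 - (eIdx xs v).getD 0 0 + 1)

lemma enumerate_append_singleton {α : Type} (xs : List α) (x : α) (s : Int) :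
    PySem.List.enumerate (xs ++ [x]) s = PySem.List.enumerate xs s ++ [(s + xs.length, x)] := by
  induction xs generalizing s with
  | nil => simp [PySem.List.enumerate_cons, PySem.List.enumerate]
  | cons y ys ih =>
      simp [PySem.List.enumerate_cons, ih (s + 1)]
      ring

lemma mem_enumerate_exists {α : Type} (xs : List α) (s : Int) (p : Int × α)
    (h : p ∈ PySem.List.enumerate xs s) :
    ∃ k : Nat, k < xs.length ∧ p.1 = s + k ∧ xs[k]? = some p.2 := by
  induction xs generalizing s with
  | nil => simp [PySem.List.enumerate] at h
  | cons y ys ih =>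
      rw [PySem.List.enumerate_cons] at h
      rcases List.mem_cons.1 h with h | h
      · exact ⟨0, by simp [h]⟩
      · obtain ⟨k, hk, h1, h2⟩ := ih (s + 1) h
        refine ⟨k + 1, by simp; omega, by push_cast at h1 ⊢; omega, by simpa using h2⟩

lemma foldl_pyRange_enumerate {σ : Type} (xs : List Int) (g : σ → Int → Int → σ) (init : σ) :
    (PySem.List.pyRange 0 (xs.length : Int) 1).foldl
      (fun st i => g st i (PySem.List.pyGetD xs i 0)) init
    = (PySem.List.enumerate xs).foldl (fun st p => g st p.1 p.2) init := by
  have hmap : PySem.List.pyRange 0 (xs.length : Int) 1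
      = (PySem.List.enumerate xs).map (fun p => p.1) := by
    rw [PySem.List.map_fst_enumerate]; norm_num
  rw [hmap, List.foldl_map]
  apply PySem.List.foldl_congr_mem
  intro acc p hp
  obtain ⟨k, hk, h1, h2⟩ := mem_enumerate_exists xs 0 p hp
  have : PySem.List.pyGetD xs p.1 0 = p.2 := by
    rw [h1]
    simp only [zero_add, PySem.List.pyGetD_natCast, List.getD_eq_getElem?_getD, h2, Option.getD_some]
  rw [this]

lemma idx_append (xs : List Int) (x v : Int) :
    eIdx (xs ++ [x]) v = eIdx xs v ++ (if x == v then [(xs.length : Int)] else []) := by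
  unfold eIdx
  rw [enumerate_append_singleton, List.filter_append, List.map_append]
  congr 1
  by_cases h : x = v <;> simp [h]

lemma mem_idx_iff (xs : List Int) (v j : Int) :
    j ∈ eIdx xs v ↔ (j, v) ∈ PySem.List.enumerate xs := by
  unfold eIdx
  simp only [List.mem_map, List.mem_filter, beq_iff_eq]
  constructor
  · rintro ⟨p, ⟨hp, h2⟩, h1⟩; cases p; subst h1; subst h2; simpa using hp
  · intro h; exact ⟨(j, v), ⟨h, rfl⟩, rfl⟩

lemma idx_sorted (xs : List Int) (v : Int) : (eIdx xs v).Pairwise (· < ·) := by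
  have h1 : (eIdx xs v).Sublist ((PySem.List.enumerate xs).map (fun p => p.1)) :=
    List.Sublist.map _ (List.filter_sublist)
  have h2 : ((PySem.List.enumerate xs).map (fun p => p.1)).Pairwise (· < ·) := by
    rw [PySem.List.map_fst_enumerate]
    exact PySem.List.pairwise_lt_pyRange_one _ _
  exact h2.sublist h1

lemma mem_idx_lt (xs : List Int) (v j : Int) (h : j ∈ eIdx xs v) :
    0 ≤ j ∧ j < xs.length := by
  have : j ∈ (PySem.List.enumerate xs).map (fun p => p.1) := by
    unfold eIdx at h
    obtain ⟨p, hp, h1⟩ := List.mem_map.1 h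
    exact List.mem_map.2 ⟨p, (List.mem_filter.1 hp).1, h1⟩
  rw [PySem.List.map_fst_enumerate] at this
  have h3 := (PySem.List.mem_pyRange_one (a := 0) (b := (xs.length : Int)) (x := j)).1 (by simpa using this)
  omega

lemma idx_ne_nil_of_mem (xs : List Int) (v : Int) (h : v ∈ xs) : eIdx xs v ≠ [] := by
  have : v ∈ (PySem.List.enumerate xs).map (fun p => p.2) := by
    rw [PySem.List.map_snd_enumerate]; exact h
  obtain ⟨p, hp, h2⟩ := List.mem_map.1 this
  obtain ⟨i, w⟩ := p
  simp only at h2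
  subst h2
  intro hnil
  have hm : i ∈ eIdx xs w := (mem_idx_iff xs w i).2 hp
  simp [hnil] at hm

lemma foldl_min_le_init (L : List Int) (a : Int) : L.foldl min a ≤ a := by
  induction L generalizing a with
  | nil => simp
  | cons x L ih => exact le_trans (ih (min a x)) (min_le_left a x)

lemma foldl_min_le_mem (L : List Int) (a x : Int) (h : x ∈ L) : L.foldl min a ≤ x := by
  induction L generalizing a with
  | nil => simp at h
  | cons y L ih =>
      rcases List.mem_cons.1 h with h | h
      · subst h; exact le_trans (foldl_min_le_init L _) (min_le_right a x)
      · exact ih _ h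

lemma foldl_min_cases (L : List Int) (a : Int) : L.foldl min a = a ∨ L.foldl min a ∈ L := by
  induction L generalizing a with
  | nil => left; rfl
  | cons x L ih =>
      have hfold : List.foldl min a (x :: L) = List.foldl min (min a x) L := rfl
      rcases ih (min a x) with h | h
      · rcases min_choice a x with h2 | h2
        · left; rw [hfold, h, h2]
        · right; rw [hfold, h, h2]; exact List.mem_cons_self
      · right; rw [hfold]; exact List.mem_cons_of_mem _ h

lemma M_eq_of_dom (L1 L2 : List Int)
    (h1 : ∀ x ∈ L1, ∃ y ∈ L2, y ≤ x) (h2 : ∀ y ∈ L2, ∃ x ∈ L1, x ≤ y) :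
    M L1 = M L2 := by
  unfold M
  apply le_antisymm
  · rcases foldl_min_cases L2 (10^9) with h | h
    · rw [h]; exact foldl_min_le_init _ _
    · obtain ⟨x, hx, hle⟩ := h2 _ h
      exact le_trans (foldl_min_le_mem _ _ _ hx) hle
  · rcases foldl_min_cases L1 (10^9) with h | h
    · rw [h]; exact foldl_min_le_init _ _
    · obtain ⟨y, hy, hle⟩ := h1 _ h
      exact le_trans (foldl_min_le_mem _ _ _ hy) hle

lemma idx_append_headD (xs : List Int) (x v : Int) (hne : eIdx xs v ≠ []) (d : Int) :
    (eIdx (xs ++ [x]) v).headD d = (eIdx xs v).headD d := by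
  rw [idx_append]
  cases h : eIdx xs v with
  | nil => exact absurd h hne
  | cons f rest => simp

lemma mem_snd_enumerate (xs : List Int) (p : Int × Int) (hp : p ∈ PySem.List.enumerate xs) :
    p.2 ∈ xs := by
  rw [← PySem.List.map_snd_enumerate xs 0]
  exact List.mem_map_of_mem hp

lemma M_append_singleton (L : List Int) (c : Int) : M (L ++ [c]) = min (M L) c := by
  simp [M, List.foldl_append]

lemma costsA_append (xs : List Int) (x : Int) :
    costsA (xs ++ [x]) = costsA xs ++
      (if eIdx xs x = [] then [] else [(xs.length : Int) - (eIdx xs x).headD 0 + 1]) := by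
  unfold costsA
  rw [enumerate_append_singleton, List.filter_append, List.map_append]
  congr 1
  · -- old pairs: both predicate and cost are unchanged
    rw [List.filter_congr (fun p hp => ?_)]
    · exact List.map_congr_left (fun p hp => by
        have hp' := (List.mem_filter.1 hp).1
        have hne := idx_ne_nil_of_mem xs p.2 (mem_snd_enumerate xs p hp')
        rw [idx_append_headD xs x p.2 hne])
    · have hne := idx_ne_nil_of_mem xs p.2 (mem_snd_enumerate xs p hp)
      rw [idx_append_headD xs x p.2 hne]
  · -- the new pair (xs.length, x)
    by_cases hnil : eIdx xs x = []
    · have hidx : eIdx (xs ++ [x]) x = [(xs.length : Int)] := by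
        rw [idx_append, hnil]; simp
      simp [hidx, hnil]
    · obtain ⟨f, rest, heq⟩ : ∃ f rest, eIdx xs x = f :: rest := by
        cases h : eIdx xs x with
        | nil => exact absurd h hnil
        | cons f rest => exact ⟨f, rest, rfl⟩
      have hflt : f < (xs.length : Int) :=
        (mem_idx_lt xs x f (by rw [heq]; exact List.mem_cons_self)).2
      have hidx : eIdx (xs ++ [x]) x = f :: (rest ++ [(xs.length : Int)]) := by
        rw [idx_append, heq]; simp
      simp only [hnil, if_false, zero_add, List.filter_cons]
      simp [hidx, heq, show ¬ (f = (xs.length:Int)) from by omega]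

lemma A_fold_char (xs : List Int) :
    (∀ v, ((PySem.List.enumerate xs).foldl (fun st p => aStep st p.1 p.2)
        (PySem.Dict.empty, (10^9 : Int))).1.get? v = (eIdx xs v).head?) ∧
    ((PySem.List.enumerate xs).foldl (fun st p => aStep st p.1 p.2)
        (PySem.Dict.empty, (10^9 : Int))).2 = M (costsA xs) := by
  induction xs using List.reverseRecOn with
  | nil =>
      constructor
      · intro v
        simp [PySem.List.enumerate, eIdx, PySem.Dict.get?_empty]
      · simp [costsA, eIdx, M, PySem.List.enumerate]
  | append_singleton xs x ih =>
      obtain ⟨ih1, ih2⟩ := ih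
      rw [enumerate_append_singleton, List.foldl_append]
      simp only [List.foldl_cons, List.foldl_nil]
      generalize hST : ((PySem.List.enumerate xs).foldl (fun st p => aStep st p.1 p.2)
          (PySem.Dict.empty, (10^9 : Int))) = ST at ih1 ih2 ⊢
      by_cases hnil : eIdx xs x = []
      · have hget : ST.1.get? x = none := by rw [ih1 x, hnil]; rfl
        unfold aStep
        rw [hget]
        constructor
        · intro v
          simp only
          rw [PySem.Dict.get?_insert]
          by_cases hv : v = x
          · subst hv
            simp [idx_append, hnil]
          · simp only [hv, if_false]
            rw [ih1 v, idx_append]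
            have : (x == v) = false := by simp [Ne.symm hv]
            simp [this]
        · simp only
          rw [ih2, costsA_append, hnil]
          simp
      · obtain ⟨f, rest, heq⟩ : ∃ f rest, eIdx xs x = f :: rest := by
          cases h : eIdx xs x with
          | nil => exact absurd h hnil
          | cons f rest => exact ⟨f, rest, rfl⟩
        have hget : ST.1.get? x = some f := by rw [ih1 x, heq]; rfl
        unfold aStep
        rw [hget]
        constructor
        · intro v
          simp only
          by_cases hv : v = x
          · subst hv
            rw [ih1 v, idx_append, heq]
            simp
          · rw [ih1 v, idx_append]
            have : (x == v) = false := by simp [Ne.symm hv]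
            simp [this]
        · simp only
          rw [ih2, costsA_append]
          simp only [hnil, if_false]
          rw [M_append_singleton]
          congr 1
          simp [heq]

lemma B_groups_getD (xs : List Int) (v : Int) :
    (bGroups xs).getD v [] = eIdx xs v := by
  unfold bGroups
  have hswap : (PySem.List.enumerate xs).foldl
        (fun g p => g.modify p.2 [] (fun l => l ++ [p.1])) PySem.Dict.empty
      = ((PySem.List.enumerate xs).map (fun p => (p.2, p.1))).foldl
        (fun d q => d.modify q.1 [] (fun l => l ++ [q.2])) PySem.Dict.empty := by
    rw [List.foldl_map]
  rw [hswap, PySem.Dict.getD_foldl_modify_append, List.filter_map, List.map_map]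
  simp [eIdx, Function.comp_def, PySem.Dict.getD_empty]

lemma B_keys (xs : List Int) : (bGroups xs).keys = PySem.Set.ofList xs := by
  unfold bGroups
  rw [PySem.Dict.keys_foldl_modify_key (PySem.List.enumerate xs) (fun p => p.2) []
      (fun _ p => (fun l => l ++ [p.1])) PySem.Dict.empty]
  rw [PySem.Dict.keys_empty, PySem.List.map_snd_enumerate]
  rfl

lemma B_nodup (xs : List Int) : (bGroups xs).keys.Nodup := by
  unfold bGroups
  exact PySem.Dict.nodup_keys_foldl_modify_key (PySem.List.enumerate xs) (fun p => p.2) []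
    (fun _ p => (fun l => l ++ [p.1])) PySem.Dict.empty (by simp [PySem.Dict.keys_empty])

lemma B_values (xs : List Int) :
    (bGroups xs).values = (PySem.Set.ofList xs).map (fun v => eIdx xs v) := by
  rw [PySem.Dict.values_eq_map_keys (bGroups xs) (B_nodup xs) [], B_keys]
  exact List.map_congr_left (fun v _ => B_groups_getD xs v)

lemma foldl_bStep_filter {α : Type} (l : List α) (f : α → List Int) (a : Int) :
    l.foldl (fun b y => bStep b (f y)) a
      = ((l.filter (fun y => 2 ≤ (f y).length)).map
          (fun y => (f y).getD 1 0 - (f y).getD 0 0 + 1)).foldl min a := by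
  induction l generalizing a with
  | nil => rfl
  | cons y l ih =>
      have hstep : List.foldl (fun b y => bStep b (f y)) a (y :: l)
          = List.foldl (fun b y => bStep b (f y)) (bStep a (f y)) l := rfl
      rw [hstep, ih]
      by_cases h : 2 ≤ (f y).length <;> simp [bStep, h]

lemma M_costs_eq (xs : List Int) : M (costsA xs) = M (costsB xs) := by
  apply M_eq_of_dom
  · -- every per-occurrence cost of A dominates the per-value cost of its value
    intro c hc
    unfold costsA at hc
    obtain ⟨p, hpf, hcv⟩ := List.mem_map.1 hc
    obtain ⟨hp, hpred⟩ := List.mem_filter.1 hpf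
    obtain ⟨i, v⟩ := p
    simp only [Bool.not_eq_eq_eq_not, Bool.not_true, beq_eq_false_iff_ne, ne_eq] at hpred
    have hi : i ∈ eIdx xs v := (mem_idx_iff xs v i).2 hp
    cases heq : eIdx xs v with
    | nil => rw [heq] at hi; simp at hi
    | cons f rest =>
        rw [heq] at hpred hi
        simp only [List.headD_cons] at hpred
        have himem : i ∈ rest := by
          rcases List.mem_cons.1 hi with h | h
          · exact absurd h.symm hpred
          · exact h
        cases rest with
        | nil => simp at himem
        | cons sidx rest2 =>
            have hsorted := idx_sorted xs v
            rw [heq] at hsorted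
            have hfs : f < sidx := (List.pairwise_cons.1 hsorted).1 sidx List.mem_cons_self
            have hsi : sidx ≤ i := by
              rcases List.mem_cons.1 himem with h | h
              · omega
              · exact le_of_lt (((List.pairwise_cons.1 (List.pairwise_cons.1 hsorted).2).1) i h)
            refine ⟨sidx - f + 1, ?_, ?_⟩
            · unfold costsB
              refine List.mem_map.2 ⟨v, List.mem_filter.2 ⟨?_, by rw [heq]; simp⟩, by rw [heq]; simp⟩
              exact (PySem.Set.mem_ofList xs v).2 (mem_snd_enumerate xs (i, v) hp)
            · simp only at hcv
              rw [heq] at hcv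
              simp only [List.headD_cons] at hcv
              omega
  · -- every per-value cost of B is itself one of A's per-occurrence costs
    intro y hy
    unfold costsB at hy
    obtain ⟨v, hvf, hyv⟩ := List.mem_map.1 hy
    obtain ⟨hv, hlen⟩ := List.mem_filter.1 hvf
    cases heq : eIdx xs v with
    | nil => rw [heq] at hlen; simp at hlen
    | cons f rest =>
        cases rest with
        | nil => rw [heq] at hlen; simp at hlen
        | cons sidx rest2 =>
            have hsorted := idx_sorted xs v
            rw [heq] at hsorted
            have hfs : f < sidx := (List.pairwise_cons.1 hsorted).1 sidx List.mem_cons_self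
            have hsmem : sidx ∈ eIdx xs v := by rw [heq]; simp
            have hpmem : (sidx, v) ∈ PySem.List.enumerate xs := (mem_idx_iff xs v sidx).1 hsmem
            refine ⟨y, ?_, le_refl y⟩
            unfold costsA
            refine List.mem_map.2 ⟨(sidx, v), List.mem_filter.2 ⟨hpmem, ?_⟩, ?_⟩
            · simp only [heq, List.headD_cons]
              simp only [Bool.not_eq_eq_eq_not, Bool.not_true, beq_eq_false_iff_ne, ne_eq]
              omega
            · simp only [heq, List.headD_cons]
              rw [heq] at hyv
              simp at hyv
              omega

lemma B_eq (xs : List Int) :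
    (bGroups xs).values.foldl bStep (10^9) = M (costsB xs) := by
  rw [B_values, List.foldl_map, foldl_bStep_filter (PySem.Set.ofList xs) (fun v => eIdx xs v)]
  rfl

-- ===== VERDICT (by name: the statement is the Claim_ definition above) =====
theorem min_cost_to_win_spec : Claim_equal_min_cost_to_win := by
  intro nums _
  show min_cost_to_win nums = min_cost_to_win_alt nums
  have hA : min_cost_to_win nums
      = if M (costsA nums) ≠ 10^9 then M (costsA nums) else -1 := by
    simp only [min_cost_to_win]
    rw [foldl_pyRange_enumerate nums (fun st i v => aStep st i v)]
    rw [(A_fold_char nums).2]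
  have hB : min_cost_to_win_alt nums
      = if M (costsB nums) ≠ 10^9 then M (costsB nums) else -1 := by
    simp only [min_cost_to_win_alt]
    rw [B_eq]
  rw [hA, hB, M_costs_eq]
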